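-- pv_equiv track=rewrite | github.com/lucyfer81/wise_collection | reddit_pain_finder/pipeline/align_cross_sources.py | _extract_workarounds
-- ===== SOURCE A (Python) =====
-- def _extract_workarounds(common_pain: str) -> str:
--     """从common_pain中提取workaround信息"""
--     # 简单实现：如果提到workaround或solution，提取相关部分
--     if not common_pain:
--         return "No specific workaround mentioned"
--
--     # 查找包含workaround、solution等关键词的句子
--     pain_lower = common_pain.lower()
--     workaround_keywords = ['workaround', 'solution', 'fix', 'solve', 'currently using', 'temporary']
--
--     for keyword in workaround_keywords:
--         if keyword in pain_lower:
--             # 返回包含关键词的部分文本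
--             sentences = common_pain.split('.')
--             for sentence in sentences:
--                 if keyword in sentence.lower():
--                     return sentence.strip()
--
--     return "No explicit workaround mentioned"
-- ===== SOURCE B (Python) =====
-- _KEYWORDS = ['workaround', 'solution', 'fix', 'solve', 'currently using', 'temporary']
--
-- def _extract_workarounds(common_pain: str) -> str:
--     """Sentence-major single pass: track the best (lowest) keyword rank seen."""
--     if not common_pain:
--         return "No specific workaround mentioned"
--
--     best = None  # (rank, sentence)
--     for sentence in common_pain.split('.'):
--         low = sentence.lower()
--         for rank, kw in enumerate(_KEYWORDS):
--             if kw in low: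
--                 if best is None or rank < best[0]:
--                     best = (rank, sentence)
--                 break
--
--     if best is None:
--         return "No explicit workaround mentioned"
--     return best[1].strip()
-- ===== Notes on version B (the rewrite author's own statement) =====
-- stated objective: alternative
-- what changed: A scans keyword-major (for each keyword present in the whole lowered text, rescan the sentence list); B splits once and makes a single sentence-major pass tracking the smallest keyword rank seen and the first sentence achieving it.
import Mathlib
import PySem

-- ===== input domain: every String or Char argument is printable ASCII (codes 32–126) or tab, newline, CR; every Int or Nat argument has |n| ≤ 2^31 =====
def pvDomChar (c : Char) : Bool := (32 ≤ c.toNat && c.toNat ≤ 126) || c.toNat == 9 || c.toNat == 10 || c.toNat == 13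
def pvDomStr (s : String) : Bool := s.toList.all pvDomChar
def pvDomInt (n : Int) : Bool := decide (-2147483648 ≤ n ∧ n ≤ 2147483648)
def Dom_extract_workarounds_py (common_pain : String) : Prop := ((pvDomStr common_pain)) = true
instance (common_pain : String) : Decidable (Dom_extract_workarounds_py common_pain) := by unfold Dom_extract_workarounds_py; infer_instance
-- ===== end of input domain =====

-- B replaces A's keyword-major nested rescan of the sentence list by a single sentence-major
-- pass with a best-keyword-rank accumulator (objective: alternative decomposition, same cost).

-- ===== PORT A =====
-- A's keyword list (inline literal in A)
def pvKeywordsA : List String := ["workaround", "solution", "fix", "solve", "currently using", "temporary"]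

-- inner 'for sentence in sentences: if keyword in sentence.lower(): return sentence.strip()'
def pvLoopS (keyword : String) : List String → Option String
  | [] => none
  | sentence :: rest =>
    if PySem.Str.isIn keyword (PySem.Str.lower sentence) then some (PySem.Str.strip sentence)
    else pvLoopS keyword rest

-- outer 'for keyword in workaround_keywords: …' ('.split(".")' never raises: sep ≠ "", so getD [] is exact)
def pvLoopK (pain_lower common_pain : String) : List String → String
  | [] => "No explicit workaround mentioned"
  | keyword :: ks =>
    if PySem.Str.isIn keyword pain_lower then
      match pvLoopS keyword ((PySem.Str.split? common_pain ".").getD []) with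
      | some r => r
      | none => pvLoopK pain_lower common_pain ks
    else pvLoopK pain_lower common_pain ks

def extract_workarounds_py (common_pain : String) : String :=
  if common_pain = "" then "No specific workaround mentioned"
  else pvLoopK (PySem.Str.lower common_pain) common_pain pvKeywordsA

-- ===== PORT B =====
def pvKeywordsB : List String := ["workaround", "solution", "fix", "solve", "currently using", "temporary"]

-- 'for rank, kw in enumerate(_KEYWORDS): if kw in low: … break' = first matching rank
def pvRank (low : String) : List String → Nat → Option Nat
  | [], _ => none
  | kw :: ks, r => if PySem.Str.isIn kw low then some r else pvRank low ks (r + 1)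

def pvStep (best : Option (Nat × String)) (sentence : String) : Option (Nat × String) :=
  match pvRank (PySem.Str.lower sentence) pvKeywordsB 0 with
  | none => best
  | some r =>
    match best with
    | none => some (r, sentence)
    | some (br, bs) => if r < br then some (r, sentence) else some (br, bs)

def extract_workarounds_py_alt (common_pain : String) : String :=
  if common_pain = "" then "No specific workaround mentioned"
  else
    match ((PySem.Str.split? common_pain ".").getD []).foldl pvStep none with
    | none => "No explicit workaround mentioned"
    | some (_, bs) => PySem.Str.strip bs

-- ===== PRECONDITION & SPEC =====
def Spec_extract_workarounds_py (common_pain : String) (out : String) : Prop := out = extract_workarounds_py_alt common_pain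
instance (common_pain : String) (out : String) : Decidable (Spec_extract_workarounds_py common_pain out) := by unfold Spec_extract_workarounds_py; infer_instance

-- ===== CLAIM (what is proved, stated in full; the proofs are below) =====
def Claim_equal_extract_workarounds_py : Prop := ∀ (common_pain : String), Dom_extract_workarounds_py common_pain → Spec_extract_workarounds_py common_pain (extract_workarounds_py common_pain)

-- ===== LEMMAS AND PROOFS =====

def pvSeg : List Char → List (List Char)
  | [] => [[]]
  | c :: rest => if c = '.' then [] :: pvSeg rest else (pvSeg rest).modifyHead (c :: ·)

theorem pvSplitOn_go_eq (l : List Char) : ∀ (fuel : Nat) (cur : List Char) (acc : List (List Char)),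
    l.length ≤ fuel →
    PySem.Chars.splitOn.go ['.'] fuel l cur acc
      = acc.reverse ++ (pvSeg l).modifyHead (cur.reverse ++ ·) := by
  induction l with
  | nil =>
    intro fuel cur acc _
    cases fuel <;> simp [PySem.Chars.splitOn.go, pvSeg]
  | cons c rest ih =>
    intro fuel cur acc hf
    cases fuel with
    | zero => simp at hf
    | succ f =>
      have hlen : rest.length ≤ f := by simpa using hf
      simp only [PySem.Chars.splitOn.go]
      by_cases hc : c = '.'
      · subst hc
        have hp : ['.'].isPrefixOf ('.' :: rest) = true := by simp [List.isPrefixOf]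
        rw [if_pos hp]
        have h2 := ih f [] (cur.reverse :: acc) hlen
        simp only [List.drop_succ_cons, List.length_singleton, List.drop_zero] at h2 ⊢
        rw [h2]
        rcases hseg : pvSeg rest with _ | ⟨h, t⟩ <;>
          simp [pvSeg, hseg, List.modifyHead]
      · have hp : ['.'].isPrefixOf (c :: rest) = false := by
          simp [List.isPrefixOf]
          exact fun h => (hc h.symm).elim
        rw [if_neg (by simp [hp])]
        have h2 := ih f (c :: cur) acc hlen
        rw [h2]
        have : pvSeg (c :: rest) = (pvSeg rest).modifyHead (c :: ·) := by simp [pvSeg, hc]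
        rw [this, List.modifyHead_modifyHead]
        rcases pvSeg rest with _ | ⟨h, t⟩ <;> simp [List.modifyHead]

theorem pvSplitOn_eq_seg (s : List Char) : PySem.Chars.splitOn s ['.'] = pvSeg s := by
  have := pvSplitOn_go_eq s (s.length + 1) [] [] (by omega)
  rw [PySem.Chars.splitOn, this]
  rcases pvSeg s with _ | ⟨h, t⟩ <;> simp [List.modifyHead]

theorem pvSeg_head (u : List Char) : ∃ t, pvSeg u = u.takeWhile (fun c => !(c == '.')) :: t := by
  induction u with
  | nil => exact ⟨[], rfl⟩
  | cons c rest ih =>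
    by_cases hc : c = '.'
    · subst hc; exact ⟨pvSeg rest, by simp [pvSeg]⟩
    · obtain ⟨t, ht⟩ := ih
      refine ⟨t, ?_⟩
      rw [List.takeWhile_cons]
      simp only [pvSeg, if_neg hc, ht, List.modifyHead]
      simp [hc]

theorem pvPrefix_takeWhile {k : List Char} (hk : ('.' : Char) ∉ k) :
    ∀ {u : List Char}, k <+: u → k <+: u.takeWhile (fun c => !(c == '.')) := by
  induction k with
  | nil => intro u _; exact List.nil_prefix
  | cons a k' ih =>
    intro u hp
    rcases u with _ | ⟨b, u'⟩
    · simp at hp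
    · rw [List.cons_prefix_cons] at hp
      obtain ⟨rfl, h2⟩ := hp
      have ha : a ≠ '.' := fun h => hk (h ▸ List.mem_cons_self)
      have hk' : ('.' : Char) ∉ k' := fun h => hk (List.mem_cons_of_mem _ h)
      rw [List.takeWhile_cons]
      simp [ha]
      exact ih hk' h2

theorem pvSeg_infix {u : List Char} : ∀ {t : List Char}, t ∈ pvSeg u → t <:+: u := by
  induction u with
  | nil => intro t ht; simp [pvSeg] at ht; simp [ht]
  | cons c rest ih =>
    intro t ht
    by_cases hc : c = '.'
    · subst hc
      simp [pvSeg] at ht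
      rcases ht with rfl | ht
      · exact List.nil_infix
      · exact (ih ht).trans (List.infix_cons (List.infix_refl _))
    · obtain ⟨tl, hht⟩ := pvSeg_head rest
      simp only [pvSeg, if_neg hc, hht, List.modifyHead, List.mem_cons] at ht
      rcases ht with rfl | ht
      · have hh : rest.takeWhile (fun c => !(c == '.')) <+: rest := List.takeWhile_prefix _
        have : c :: rest.takeWhile (fun c => !(c == '.')) <+: c :: rest :=
          List.cons_prefix_cons.mpr ⟨rfl, hh⟩
        exact this.isInfix
      · exact (ih (hht ▸ List.mem_cons_of_mem _ ht)).trans (List.infix_cons (List.infix_refl _))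

theorem pvMain {k : List Char} (hk : ('.' : Char) ∉ k) (u : List Char) :
    k <:+: u ↔ ∃ t ∈ pvSeg u, k <:+: t := by
  constructor
  · intro h
    induction u with
    | nil => exact ⟨[], by simp [pvSeg], by simpa using h⟩
    | cons c rest ih =>
      rcases List.infix_cons_iff.mp h with hp | hi
      · by_cases hc : c = '.'
        · subst hc
          rcases k with _ | ⟨a, k'⟩
          · exact ⟨[], by simp [pvSeg], List.nil_infix⟩
          · rw [List.cons_prefix_cons] at hp
            exact absurd (hp.1 ▸ List.mem_cons_self) hk
        · obtain ⟨tl, hht⟩ := pvSeg_head rest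
          rcases k with _ | ⟨a, k'⟩
          · exact ⟨c :: rest.takeWhile (fun c => !(c == '.')),
              by simp [pvSeg, hc, hht, List.modifyHead], List.nil_infix⟩
          · rw [List.cons_prefix_cons] at hp
            obtain ⟨rfl, hk'p⟩ := hp
            have hk' : ('.' : Char) ∉ k' := fun hm => hk (List.mem_cons_of_mem _ hm)
            have hpref : k' <+: rest.takeWhile (fun c => !(c == '.')) :=
              pvPrefix_takeWhile hk' hk'p
            exact ⟨a :: rest.takeWhile (fun c => !(c == '.')),
              by simp [pvSeg, hc, hht, List.modifyHead],
              (List.cons_prefix_cons.mpr ⟨rfl, hpref⟩).isInfix⟩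
      · obtain ⟨t, htm, hti⟩ := ih hi
        by_cases hc : c = '.'
        · exact ⟨t, by simp [pvSeg, hc, htm], hti⟩
        · obtain ⟨tl, hht⟩ := pvSeg_head rest
          rw [hht, List.mem_cons] at htm
          rcases htm with rfl | htm
          · exact ⟨c :: rest.takeWhile (fun c => !(c == '.')),
              by simp [pvSeg, hc, hht, List.modifyHead],
              hti.trans (List.infix_cons (List.infix_refl _))⟩
          · exact ⟨t, by simp [pvSeg, hc, hht, List.modifyHead, htm], hti⟩
  · rintro ⟨t, htm, hti⟩
    exact hti.trans (pvSeg_infix htm)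

theorem pvLowerChar_dot (c : Char) : (PySem.Chars.lowerChar c = '.') ↔ (c = '.') := by
  unfold PySem.Chars.lowerChar PySem.Chars.isupper
  by_cases h : ('A' ≤ c ∧ c ≤ 'Z')
  · have h1 : 65 ≤ c.toNat := h.1
    have h2 : c.toNat ≤ 90 := h.2
    rw [if_pos (by simp [decide_eq_true_eq]; exact h)]
    constructor
    · intro he
      have hv : (c.toNat + 32).isValidChar := Or.inl (by omega)
      have : (Char.ofNat (c.toNat + 32)).toNat = ('.' : Char).toNat := by rw [he]
      rw [Char.toNat_ofNat, if_pos hv] at this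
      have hdot : ('.' : Char).toNat = 46 := rfl
      omega
    · intro he
      subst he
      have hdot : ('.' : Char).toNat = 46 := rfl
      omega
  · rw [if_neg (by simpa [decide_eq_true_eq, Decidable.not_and_iff_or_not] using (by tauto : ¬('A' ≤ c ∧ c ≤ 'Z')))]

theorem pvSeg_lower (u : List Char) : pvSeg (PySem.Chars.lower u) = (pvSeg u).map PySem.Chars.lower := by
  induction u with
  | nil => simp [pvSeg, PySem.Chars.lower]
  | cons c rest ih =>
    simp only [PySem.Chars.lower, List.map_cons]
    by_cases hc : c = '.'
    · have : PySem.Chars.lowerChar c = '.' := (pvLowerChar_dot c).mpr hc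
      simp only [pvSeg, if_pos hc, if_pos this, List.map_cons]
      simpa [PySem.Chars.lower] using ih
    · have hlc : PySem.Chars.lowerChar c ≠ '.' := fun h => hc ((pvLowerChar_dot c).mp h)
      simp only [pvSeg, if_neg hc, if_neg hlc]
      rw [show (List.map PySem.Chars.lowerChar rest) = PySem.Chars.lower rest from rfl, ih]
      rcases pvSeg rest with _ | ⟨h, t⟩ <;> simp [List.modifyHead, PySem.Chars.lower]

def pvSents (s : String) : List String := (PySem.Str.split? s ".").getD []

theorem pvSents_toList (s : String) : (pvSents s).map String.toList = pvSeg s.toList := by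
  have h := PySem.Str.split?_map s "."
  have hsep : ("." : String).toList = ['.'] := rfl
  rw [hsep] at h
  rw [pvSents]
  rcases hs : PySem.Str.split? s "." with _ | ss
  · rw [hs] at h
    unfold PySem.Chars.split? at h
    simp at h
  · rw [hs] at h
    unfold PySem.Chars.split? at h
    simp at h
    rw [← pvSplitOn_eq_seg, ← h]
    simp

theorem pvBridge {k : String} (hk : ('.' : Char) ∉ k.toList) (s : String) :
    PySem.Str.isIn k (PySem.Str.lower s) = true
      ↔ ∃ sent ∈ pvSents s, PySem.Str.isIn k (PySem.Str.lower sent) = true := by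
  rw [PySem.Str.isIn_iff_infix, PySem.Str.toList_lower]
  rw [pvMain hk]
  rw [pvSeg_lower, ← pvSents_toList]
  constructor
  · rintro ⟨t, htm, hti⟩
    simp only [List.map_map, List.mem_map] at htm
    obtain ⟨sent, hsm, rfl⟩ := htm
    exact ⟨sent, hsm, by
      rw [PySem.Str.isIn_iff_infix, PySem.Str.toList_lower]; exact hti⟩
  · rintro ⟨sent, hsm, hin⟩
    rw [PySem.Str.isIn_iff_infix, PySem.Str.toList_lower] at hin
    exact ⟨PySem.Chars.lower sent.toList, by
      simp only [List.map_map, List.mem_map]; exact ⟨sent, hsm, rfl⟩, hin⟩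

theorem pvLoopS_eq_find (k : String) (l : List String) :
    pvLoopS k l = (l.find? (fun sent => PySem.Str.isIn k (PySem.Str.lower sent))).map PySem.Str.strip := by
  induction l with
  | nil => rfl
  | cons sent rest ih =>
    rw [pvLoopS, List.find?_cons]
    cases h : PySem.Str.isIn k (PySem.Str.lower sent) with
    | true => simp only [if_true]; rfl
    | false => simp only [Bool.false_eq_true, if_false]; exact ih

theorem pvLoopK_all_false (pl cp : String) {ks : List String}
    (h : ∀ k ∈ ks, PySem.Str.isIn k pl = false) :
    pvLoopK pl cp ks = "No explicit workaround mentioned" := by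
  induction ks with
  | nil => rfl
  | cons k rest ih =>
    rw [pvLoopK, if_neg (by simpa using h k List.mem_cons_self)]
    exact ih (fun k' hk' => h k' (List.mem_cons_of_mem _ hk'))

theorem pvLoopK_append_false (pl cp : String) {pre : List String} (ks : List String)
    (h : ∀ k ∈ pre, PySem.Str.isIn k pl = false) :
    pvLoopK pl cp (pre ++ ks) = pvLoopK pl cp ks := by
  induction pre with
  | nil => rfl
  | cons k rest ih =>
    rw [List.cons_append, pvLoopK, if_neg (by simpa using h k List.mem_cons_self)]
    exact ih (fun k' hk' => h k' (List.mem_cons_of_mem _ hk'))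

theorem pvRank_lb {low : String} {ks : List String} : ∀ {i j : Nat}, pvRank low ks i = some j → i ≤ j := by
  induction ks with
  | nil => intro i j h; simp [pvRank] at h
  | cons kw rest ih =>
    intro i j h
    rw [pvRank] at h
    by_cases hkw : PySem.Str.isIn kw low = true
    · rw [if_pos hkw] at h
      exact Nat.le_of_eq (Option.some.inj h)
    · rw [if_neg hkw] at h
      have := ih h
      omega

theorem pvRank_append_false {low : String} {pre : List String} (ks : List String) :
    ∀ (i : Nat), (∀ kw ∈ pre, PySem.Str.isIn kw low = false) →
    pvRank low (pre ++ ks) i = pvRank low ks (i + pre.length) := by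
  induction pre with
  | nil => intro i _; simp
  | cons kw rest ih =>
    intro i h
    rw [List.cons_append, pvRank, if_neg (by simpa using h kw List.mem_cons_self)]
    rw [ih (i+1) (fun k' hk' => h k' (List.mem_cons_of_mem _ hk'))]
    simp [List.length_cons]
    congr 1
    omega

theorem pvRank_some_mem {low : String} {ks : List String} : ∀ {i j : Nat}, pvRank low ks i = some j →
    ∃ kw ∈ ks, PySem.Str.isIn kw low = true := by
  induction ks with
  | nil => intro i j h; simp [pvRank] at h
  | cons kw rest ih =>
    intro i j h
    rw [pvRank] at h
    by_cases hkw : PySem.Str.isIn kw low = true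
    · exact ⟨kw, List.mem_cons_self, hkw⟩
    · rw [if_neg hkw] at h
      obtain ⟨kw', hm, hkw'⟩ := ih h
      exact ⟨kw', List.mem_cons_of_mem _ hm, hkw'⟩

theorem pvFold_none {l : List String}
    (h : ∀ sent ∈ l, pvRank (PySem.Str.lower sent) pvKeywordsB 0 = none) :
    l.foldl pvStep none = none := by
  induction l with
  | nil => rfl
  | cons sent rest ih =>
    rw [List.foldl_cons]
    have hs := h sent List.mem_cons_self
    have : pvStep none sent = none := by rw [pvStep, hs]
    rw [this]
    exact ih (fun s' hs' => h s' (List.mem_cons_of_mem _ hs'))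

theorem pvFold_gt {r : Nat} {l : List String}
    (h : ∀ sent ∈ l, ∀ j, pvRank (PySem.Str.lower sent) pvKeywordsB 0 = some j → r < j) :
    ∀ {acc : Option (Nat × String)},
      (acc = none ∨ ∃ br bs, acc = some (br, bs) ∧ r < br) →
      (l.foldl pvStep acc = none ∨ ∃ br bs, l.foldl pvStep acc = some (br, bs) ∧ r < br) := by
  induction l with
  | nil => intro acc hacc; simpa using hacc
  | cons sent rest ih =>
    intro acc hacc
    rw [List.foldl_cons]
    apply ih (fun s' hs' => h s' (List.mem_cons_of_mem _ hs'))
    rcases hrank : pvRank (PySem.Str.lower sent) pvKeywordsB 0 with _ | j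
    · rw [pvStep, hrank]; exact hacc
    · have hj : r < j := h sent List.mem_cons_self j hrank
      rcases hacc with rfl | ⟨br, bs, rfl, hbr⟩
      · rw [pvStep, hrank]; exact Or.inr ⟨j, sent, rfl, hj⟩
      · rw [pvStep, hrank]
        simp only []
        by_cases hlt : j < br
        · rw [if_pos hlt]
          exact Or.inr ⟨j, sent, rfl, hj⟩
        · rw [if_neg hlt]
          exact Or.inr ⟨br, bs, rfl, hbr⟩

theorem pvFold_keep {r : Nat} {w : String} {l : List String}
    (h : ∀ sent ∈ l, ∀ j, pvRank (PySem.Str.lower sent) pvKeywordsB 0 = some j → r ≤ j) :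
    l.foldl pvStep (some (r, w)) = some (r, w) := by
  induction l with
  | nil => rfl
  | cons sent rest ih =>
    rw [List.foldl_cons]
    have hstep : pvStep (some (r, w)) sent = some (r, w) := by
      rw [pvStep]
      rcases hrank : pvRank (PySem.Str.lower sent) pvKeywordsB 0 with _ | j
      · rfl
      · have : r ≤ j := h sent List.mem_cons_self j hrank
        simp [Nat.not_lt.mpr this]
    rw [hstep]
    exact ih (fun s' hs' => h s' (List.mem_cons_of_mem _ hs'))

theorem pvKeywords_dotfree : ∀ k ∈ pvKeywordsA, ('.' : Char) ∉ k.toList := by decide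

theorem pvMainEq (s : String) (hs : s ≠ "") :
    extract_workarounds_py s = extract_workarounds_py_alt s := by
  rw [extract_workarounds_py, extract_workarounds_py_alt, if_neg hs, if_neg hs]
  rw [show (PySem.Str.split? s ".").getD [] = pvSents s from rfl]
  set pl := PySem.Str.lower s with hpl
  set ss := pvSents s with hss
  have hBA : pvKeywordsB = pvKeywordsA := rfl
  rcases hfind : pvKeywordsA.find? (fun k => PySem.Str.isIn k pl) with _ | k
  · -- no keyword occurs in the lowered string
    have hall : ∀ k ∈ pvKeywordsA, PySem.Str.isIn k pl = false := by
      intro k hk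
      have := List.find?_eq_none.mp hfind k hk
      simpa using this
    rw [pvLoopK_all_false pl s hall]
    have hnone : ∀ sent ∈ ss, pvRank (PySem.Str.lower sent) pvKeywordsB 0 = none := by
      intro sent hsent
      rcases hrank : pvRank (PySem.Str.lower sent) pvKeywordsB 0 with _ | j
      · rfl
      · obtain ⟨kw, hkm, hkin⟩ := pvRank_some_mem hrank
        rw [hBA] at hkm
        have : PySem.Str.isIn kw pl = true :=
          (pvBridge (pvKeywords_dotfree kw hkm) s).mpr ⟨sent, hsent, hkin⟩
        rw [hall kw hkm] at this
        exact absurd this (by simp)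
    rw [pvFold_none hnone]
  · -- first occurring keyword k, at rank r = kwPre.length
    obtain ⟨hkp, kwPre, kwSuf, hksplit, hkpre⟩ := List.find?_eq_some_iff_append.mp hfind
    have hkmem : k ∈ pvKeywordsA := hksplit ▸ List.mem_append_right _ List.mem_cons_self
    have hkdot : ('.' : Char) ∉ k.toList := pvKeywords_dotfree k hkmem
    have hkpre' : ∀ a ∈ kwPre, PySem.Str.isIn a pl = false := by
      intro a ha; simpa using hkpre a ha
    set r := kwPre.length with hr
    -- the first sentence containing k
    obtain ⟨sent0, hsent0m, hsent0⟩ := (pvBridge hkdot s).mp hkp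
    obtain ⟨w, hw⟩ : ∃ w, ss.find? (fun sent => PySem.Str.isIn k (PySem.Str.lower sent)) = some w := by
      rcases hfs : ss.find? (fun sent => PySem.Str.isIn k (PySem.Str.lower sent)) with _ | w
      · have := List.find?_eq_none.mp hfs sent0 hsent0m
        rw [hsent0] at this
        exact absurd rfl this
      · exact ⟨w, rfl⟩
    obtain ⟨hqw, pre, suf, hssplit, hqpre⟩ := List.find?_eq_some_iff_append.mp hw
    -- every keyword before k is absent from every lowered sentence
    have hpre_false : ∀ sent ∈ ss, ∀ a ∈ kwPre, PySem.Str.isIn a (PySem.Str.lower sent) = false := by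
      intro sent hsent a ha
      rcases hval : PySem.Str.isIn a (PySem.Str.lower sent) with _ | _
      · rfl
      · have : PySem.Str.isIn a pl = true :=
          (pvBridge (pvKeywords_dotfree a (hksplit ▸ List.mem_append_left _ ha)) s).mpr
            ⟨sent, hsent, hval⟩
        rw [hkpre' a ha] at this
        exact absurd this (by simp)
    -- rank lower bounds
    have hge : ∀ sent ∈ ss, ∀ j, pvRank (PySem.Str.lower sent) pvKeywordsB 0 = some j → r ≤ j := by
      intro sent hsent j hj
      rw [hBA, hksplit, pvRank_append_false _ 0 (hpre_false sent hsent)] at hj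
      have := pvRank_lb hj
      omega
    -- A-side
    rw [hksplit, pvLoopK_append_false pl s _ hkpre', pvLoopK, if_pos hkp, pvLoopS_eq_find]
    rw [show (PySem.Str.split? s ".").getD [] = ss from rfl, hw]
    -- B-side: fold over pre, then w, then suf
    have hpre_gt : ∀ sent ∈ pre, ∀ j, pvRank (PySem.Str.lower sent) pvKeywordsB 0 = some j → r < j := by
      intro sent hsent j hj
      have hsentss : sent ∈ ss := hssplit ▸ List.mem_append_left _ hsent
      rw [hBA, hksplit, pvRank_append_false _ 0 (hpre_false sent hsentss), pvRank,
        if_neg (by simpa using hqpre sent hsent)] at hj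
      have := pvRank_lb hj
      omega
    have hwss : w ∈ ss := hssplit ▸ List.mem_append_right _ List.mem_cons_self
    have hw_rank : pvRank (PySem.Str.lower w) pvKeywordsB 0 = some r := by
      rw [hBA, hksplit, pvRank_append_false _ 0 (hpre_false w hwss), pvRank, if_pos hqw,
        Nat.zero_add]
    rw [hssplit, List.foldl_append, List.foldl_cons]
    have hacc := pvFold_gt hpre_gt (acc := none) (Or.inl rfl)
    have hstep : pvStep (pre.foldl pvStep none) w = some (r, w) := by
      rcases hacc with hacc | ⟨br, bs, hacc, hbr⟩
      · rw [pvStep, hw_rank, hacc]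
      · rw [pvStep, hw_rank, hacc]
        simp only []
        rw [if_pos hbr]
    rw [hstep, pvFold_keep (fun sent hsent => hge sent (hssplit ▸ List.mem_append_right _ (List.mem_cons_of_mem _ hsent)))]
    rfl

theorem extract_workarounds_py_spec' : ∀ (common_pain : String),
    extract_workarounds_py common_pain = extract_workarounds_py_alt common_pain := by
  intro s
  by_cases hs : s = ""
  · subst hs; rfl
  · exact pvMainEq s hs

-- ===== VERDICT (by name: the statement is the Claim_ definition above) =====
theorem extract_workarounds_py_spec : Claim_equal_extract_workarounds_py := by
  intro common_pain _
  unfold Spec_extract_workarounds_py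
  exact extract_workarounds_py_spec' common_pain
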